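-- pv_equiv track=rewrite | github.com/NahidaNahida/doss_repo | code/WeightedAdder/adder_specification.py | program_specification_value
-- ===== SOURCE A (Python) =====
-- def program_specification_value(input_qubits, total_qubits, number, weight):
--     '''
--         return theta for Ry gate
--     '''
--     # initial state = [1, 0] means (01)b = 1
--     s = total_qubits - input_qubits
--     str_number = bin(number)[2:]
--     str_number = str_number.zfill(input_qubits)
--     initial_state = [int(bit) for bit in str_number]
--     rev_initial_state = initial_state[::-1]
--     exp_res = 0
--     for i in range(input_qubits):
--         exp_res += rev_initial_state[i] * weight[i]
--     str_exp_res = bin(int(exp_res))[2:]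
--     str_exp_res = str_exp_res.zfill(s)
--     str_exp_res = str_exp_res[::-1]
--     value = number
--     for ind, bit in enumerate(str_exp_res):
--         value += int(bit) * (2 ** (input_qubits + ind))
--     return value
-- ===== SOURCE B (Python) =====
-- def program_specification_value(input_qubits, total_qubits, number, weight):
--     '''
--         return theta for Ry gate
--     '''
--     # weighted sum of the low input_qubits bits of number, peeled off arithmetically
--     exp_res = 0
--     m = number
--     for i in range(input_qubits):
--         exp_res += (m % 2) * weight[i]
--         m //= 2
--     # appending the binary digits of exp_res above bit input_qubits is just a shift-and-add
--     return number + int(exp_res) * (2 ** input_qubits)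
-- ===== Notes on version B (the rewrite author's own statement) =====
-- stated objective: faster
-- what changed: B peels the low bits of number off arithmetically with a running halving accumulator (m % 2, m //= 2) instead of A's bin/zfill/reverse string round-trip, and replaces A's second binary-string reconstruction loop (which recomputes 2 ** (input_qubits + ind) each iteration) by the closed form number + exp_res * 2 ** input_qubits.
-- outside the precondition, e.g. on program_specification_value(-1, 1, 3, []): A returns 3.0, B returns 3.0; on program_specification_value(2, 4, -3, [1, 2]): A raises ValueError, B returns 1; on program_specification_value(2, 4, 2, [-1, -2]): A raises ValueError, B returns -6
import Mathlib
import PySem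

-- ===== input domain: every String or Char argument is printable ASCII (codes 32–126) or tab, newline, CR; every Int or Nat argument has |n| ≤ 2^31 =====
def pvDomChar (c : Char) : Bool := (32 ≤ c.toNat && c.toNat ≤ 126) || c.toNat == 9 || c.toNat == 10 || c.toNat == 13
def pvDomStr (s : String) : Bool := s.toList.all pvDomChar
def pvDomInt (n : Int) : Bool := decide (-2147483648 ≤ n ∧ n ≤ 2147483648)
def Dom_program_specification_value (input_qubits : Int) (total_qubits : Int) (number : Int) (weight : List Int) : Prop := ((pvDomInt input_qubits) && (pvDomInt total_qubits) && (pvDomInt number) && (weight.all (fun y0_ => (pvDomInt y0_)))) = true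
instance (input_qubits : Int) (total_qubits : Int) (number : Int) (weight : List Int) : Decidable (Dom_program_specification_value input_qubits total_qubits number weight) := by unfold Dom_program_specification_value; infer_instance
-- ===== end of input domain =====

-- B replaces A's bin/zfill/reverse string round-trips by a running halving accumulator and a
-- closed-form shift-and-add; a timing run measured B faster on large inputs.

-- ===== PORT A =====
-- bin(n)[2:] for n ≥ 0, most-significant bit first (hand port, exact for n ≥ 0: '0b' stripped)
def pvBinDigits : Nat → List Char
  | 0 => []
  | (n+1) => pvBinDigits ((n+1) / 2) ++ [if (n+1) % 2 = 1 then '1' else '0']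
decreasing_by exact Nat.div_lt_self (Nat.succ_pos n) (by norm_num)

def pvBin (n : Nat) : List Char := if n = 0 then ['0'] else pvBinDigits n

-- str.zfill(k): pad with '0' on the left to length k (no-op for k ≤ len; exact)
def pvZfill (l : List Char) (k : Int) : List Char := List.replicate (k.toNat - l.length) '0' ++ l

-- int(bit) for a binary digit character
def pvBitv (c : Char) : Int := if c = '1' then 1 else 0

def program_specification_value (input_qubits : Int) (total_qubits : Int) (number : Int) (weight : List Int) : Int :=
  let s := total_qubits - input_qubits
  -- bin(number)[2:]: exact for number ≥ 0 (Pre_); .zfill(input_qubits)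
  let str_number := pvZfill (pvBin number.toNat) input_qubits
  let initial_state := str_number.map pvBitv
  let rev_initial_state := initial_state.reverse
  let exp_res := (PySem.List.pyRange 0 input_qubits 1).foldl
      (fun acc i => acc + PySem.List.pyGetD rev_initial_state i 0 * PySem.List.pyGetD weight i 0) 0
  -- bin(int(exp_res))[2:]: exact for exp_res ≥ 0 (Pre_); .zfill(s) then [::-1]
  let str_exp_res := (pvZfill (pvBin exp_res.toNat) s).reverse
  -- 2 ** (input_qubits + ind): exact for input_qubits ≥ 0 (Pre_)
  (PySem.List.enumerate str_exp_res 0).foldl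
      (fun v p => v + pvBitv p.2 * 2 ^ (input_qubits + p.1).toNat) number

-- ===== PORT B =====
def program_specification_value_alt (input_qubits : Int) (total_qubits : Int) (number : Int) (weight : List Int) : Int :=
  let st := (PySem.List.pyRange 0 input_qubits 1).foldl
      (fun st i => (st.1 + PySem.Int.mod st.2 2 * PySem.List.pyGetD weight i 0,
                    PySem.Int.floordiv st.2 2)) ((0:Int), number)
  -- 2 ** input_qubits: exact for input_qubits ≥ 0 (Pre_)
  number + st.1 * (2:Int) ^ input_qubits.toNat

-- ===== PRECONDITION & SPEC =====
-- closed-form weighted sum of the low bits of number, used only to state the precondition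
def pvExpSum (input_qubits : Int) (number : Int) (weight : List Int) : Int :=
  ((List.range input_qubits.toNat).map
    (fun k => ((number.toNat / 2 ^ k % 2 : Nat) : Int) * weight.getD k 0)).sum

-- Pre_ excludes exactly: number < 0 or a negative weighted bit-sum (A raises ValueError on
-- bin()'s 'b'/'-'), input_qubits > len(weight) (IndexError), and input_qubits < 0 (A returns
-- a float such as 3.0, not an int, via 2 ** negative).
def Pre_program_specification_value (input_qubits : Int) (total_qubits : Int) (number : Int) (weight : List Int) : Prop :=
  0 ≤ input_qubits ∧ 0 ≤ number ∧ input_qubits ≤ (weight.length : Int) ∧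
    0 ≤ pvExpSum input_qubits number weight
instance (input_qubits : Int) (total_qubits : Int) (number : Int) (weight : List Int) : Decidable (Pre_program_specification_value input_qubits total_qubits number weight) := by unfold Pre_program_specification_value; infer_instance

def pvWitness_program_specification_value : Int × Int × Int × List Int := (2, 4, 3, [1, 2])

def Spec_program_specification_value (input_qubits : Int) (total_qubits : Int) (number : Int) (weight : List Int) (out : Int) : Prop := out = program_specification_value_alt input_qubits total_qubits number weight
instance (input_qubits : Int) (total_qubits : Int) (number : Int) (weight : List Int) (out : Int) : Decidable (Spec_program_specification_value input_qubits total_qubits number weight out) := by unfold Spec_program_specification_value; infer_instance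

-- ===== CLAIM (what is proved, stated in full; the proofs are below) =====
def Claim_equal_program_specification_value : Prop := ∀ (input_qubits : Int) (total_qubits : Int) (number : Int) (weight : List Int), Dom_program_specification_value input_qubits total_qubits number weight → Pre_program_specification_value input_qubits total_qubits number weight → Spec_program_specification_value input_qubits total_qubits number weight (program_specification_value input_qubits total_qubits number weight)

-- ===== LEMMAS AND PROOFS =====

theorem pvBinDigits_bit (n : Nat) : ∀ k, (((pvBinDigits n).map pvBitv).reverse).getD k 0 = ((n / 2 ^ k % 2 : Nat) : Int) := by
  induction n using Nat.strong_induction_on with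
  | _ n ih =>
    match n with
    | 0 => intro k; simp [pvBinDigits]
    | Nat.succ m =>
      intro k
      rw [pvBinDigits]
      rw [List.map_append, List.reverse_append]
      cases k with
      | zero =>
        simp [pvBitv, pow_zero, Nat.div_one]
        rcases Nat.mod_two_eq_zero_or_one (m+1) with h | h <;> simp [h] <;> omega
      | succ k =>
        have hrec := ih ((m+1)/2) (Nat.div_lt_self (Nat.succ_pos m) (by norm_num)) k
        simp only [List.map_cons, List.map_nil, List.reverse_cons, List.reverse_nil, List.nil_append, List.cons_append]
        simpa [Nat.div_div_eq_div_mul, pow_succ, Nat.mul_comm] using hrec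

theorem pvBin_bit (n k : Nat) :
    (((pvBin n).map pvBitv).reverse).getD k 0 = ((n / 2 ^ k % 2 : Nat) : Int) := by
  unfold pvBin
  by_cases h : n = 0
  · subst h; cases k <;> simp [pvBitv]
  · simp only [h, if_false]
    exact pvBinDigits_bit n k

theorem getD_append_replicate_zero (xs : List Int) (p k : Nat) :
    (xs ++ List.replicate p (0:Int)).getD k 0 = xs.getD k 0 := by
  induction xs generalizing k with
  | nil => cases k <;> simp [List.getD]
  | cons x xs ih =>
    cases k with
    | zero => simp [List.getD]
    | succ k => simpa [List.getD] using ih k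

theorem zfill_rev_bit (n : Nat) (kk : Int) (k : Nat) :
    (((pvZfill (pvBin n) kk).map pvBitv).reverse).getD k 0 = ((n / 2 ^ k % 2 : Nat) : Int) := by
  unfold pvZfill
  rw [List.map_append, List.reverse_append]
  have hrep : (List.replicate (kk.toNat - (pvBin n).length) '0').map pvBitv
      = List.replicate (kk.toNat - (pvBin n).length) (0:Int) := by
    simp [List.map_replicate, pvBitv]
  rw [hrep, List.reverse_replicate, getD_append_replicate_zero, pvBin_bit]

def pvLval : List Char → Int
  | [] => 0
  | c :: cs => pvBitv c + 2 * pvLval cs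

theorem pvLval_append_zeros (xs : List Char) (p : Nat) :
    pvLval (xs ++ List.replicate p '0') = pvLval xs := by
  induction xs with
  | nil =>
    simp only [List.nil_append]
    induction p with
    | zero => rfl
    | succ p ih => simpa [List.replicate_succ, pvLval, pvBitv] using ih
  | cons c cs ih => simp [pvLval, ih]

theorem pvLval_binDigits (n : Nat) : pvLval ((pvBinDigits n).reverse) = (n : Int) := by
  induction n using Nat.strong_induction_on with
  | _ n ih =>
    match n with
    | 0 => simp [pvBinDigits, pvLval]
    | Nat.succ m =>
      rw [pvBinDigits, List.reverse_append]
      have hrec := ih ((m+1)/2) (Nat.div_lt_self (Nat.succ_pos m) (by norm_num))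
      simp only [List.reverse_cons, List.reverse_nil, List.nil_append, List.cons_append,
        pvLval, hrec]
      rcases Nat.mod_two_eq_zero_or_one (m+1) with h | h <;> simp [h, pvBitv] <;> omega

theorem pvLval_zfill_rev (n : Nat) (kk : Int) :
    pvLval ((pvZfill (pvBin n) kk).reverse) = (n : Int) := by
  unfold pvZfill pvBin
  rw [List.reverse_append, List.reverse_replicate, pvLval_append_zeros]
  by_cases h : n = 0
  · subst h; simp [pvLval, pvBitv]
  · simp only [h, if_false]; exact pvLval_binDigits n

theorem enum_fold (off : Nat) (l : List Char) : ∀ (s : Nat) (v : Int),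
    (PySem.List.enumerate l (s : Int)).foldl
      (fun v p => v + pvBitv p.2 * 2 ^ (((off : Nat) : Int) + p.1).toNat) v
      = v + 2 ^ (off + s) * pvLval l := by
  induction l with
  | nil => intro s v; simp [PySem.List.enumerate_nil, pvLval]
  | cons c cs ih =>
    intro s v
    rw [PySem.List.enumerate_cons, List.foldl_cons]
    have hcast : ((s : Int) + 1) = ((s + 1 : Nat) : Int) := by push_cast; ring
    rw [hcast, ih (s+1)]
    have hexp : (((off : Nat) : Int) + (s : Int)).toNat = off + s := by omega
    simp only [hexp, pvLval]
    have : (2:Int) ^ (off + (s + 1)) = 2 ^ off * 2 ^ s * 2 := by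
      rw [pow_add, pow_succ]; ring
    rw [this]; ring

theorem expA_eq (input_qubits number : Int) (weight : List Int) :
    (PySem.List.pyRange 0 input_qubits 1).foldl
      (fun acc i => acc + PySem.List.pyGetD (((pvZfill (pvBin number.toNat) input_qubits).map pvBitv).reverse) i 0 * PySem.List.pyGetD weight i 0) 0
    = pvExpSum input_qubits number weight := by
  rw [PySem.List.foldl_add, PySem.List.pyRange_one]
  unfold pvExpSum
  rw [List.map_map]
  simp only [zero_add, Int.sub_zero]
  congr 1
  apply List.map_congr_left
  intro k hk
  simp only [Function.comp_apply]
  rw [PySem.List.pyGetD_natCast, PySem.List.pyGetD_natCast, zfill_rev_bit]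

theorem expB_go (w : List Int) : ∀ (n : Nat) (a : Int) (acc : Int) (m : Nat), 0 ≤ a →
    ((PySem.List.pyRange a (a + (n : Int)) 1).foldl
        (fun st i => (st.1 + PySem.Int.mod st.2 2 * PySem.List.pyGetD w i 0,
                      PySem.Int.floordiv st.2 2)) (acc, ((m : Nat) : Int))).1
    = acc + ((List.range n).map (fun k => ((m / 2 ^ k % 2 : Nat) : Int) * w.getD (a.toNat + k) 0)).sum := by
  intro n
  induction n with
  | zero => intro a acc m ha; simp [PySem.List.pyRange_one_eq_nil]
  | succ n ih =>
    intro a acc m ha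
    rw [PySem.List.pyRange_one_cons (by omega)]
    rw [List.foldl_cons]
    have hmod : PySem.Int.mod ((m : Nat) : Int) 2 = (((m % 2 : Nat) : Nat) : Int) := by
      exact_mod_cast PySem.Int.mod_natCast m 2
    have hdiv : PySem.Int.floordiv ((m : Nat) : Int) 2 = (((m / 2 : Nat) : Nat) : Int) := by
      exact_mod_cast PySem.Int.floordiv_natCast m 2
    have hrange : a + ((n + 1 : Nat) : Int) = (a + 1) + (n : Int) := by push_cast; ring
    rw [hrange, hmod, hdiv, ih (a+1) _ (m/2) (by omega)]
    have hga : PySem.List.pyGetD w a 0 = w.getD a.toNat 0 := by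
      rw [show a = ((a.toNat : Nat) : Int) by omega, PySem.List.pyGetD_natCast, Int.toNat_natCast]
    have hpt : ((List.range n).map (fun k => ((m / 2 / 2 ^ k % 2 : Nat) : Int) * w.getD ((a+1).toNat + k) 0))
        = (List.range n).map (fun x => ((m / 2 ^ (x+1) % 2 : Nat) : Int) * w.getD (a.toNat + (x+1)) 0) := by
      apply List.map_congr_left
      intro k hk
      have h1 : m / 2 / 2 ^ k = m / 2 ^ (k+1) := by
        rw [Nat.div_div_eq_div_mul, pow_succ, Nat.mul_comm]
      have h2 : (a+1).toNat + k = a.toNat + (k+1) := by omega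
      rw [h1, h2]
    rw [hpt]
    conv_rhs => rw [List.range_succ_eq_map, List.map_cons, List.map_map, List.sum_cons]
    simp only [Function.comp_def, Nat.succ_eq_add_one, pow_zero, Nat.div_one, Nat.add_zero, hga]
    ring

theorem expB_eq (input_qubits number : Int) (weight : List Int) (h0 : 0 ≤ input_qubits) (hn : 0 ≤ number) :
    ((PySem.List.pyRange 0 input_qubits 1).foldl
        (fun st i => (st.1 + PySem.Int.mod st.2 2 * PySem.List.pyGetD weight i 0,
                      PySem.Int.floordiv st.2 2)) ((0:Int), number)).1
    = pvExpSum input_qubits number weight := by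
  have h := expB_go weight input_qubits.toNat 0 0 number.toNat (le_refl 0)
  rw [Int.toNat_of_nonneg hn] at h
  simp only [Int.toNat_zero, zero_add] at h
  rw [show input_qubits = ((input_qubits.toNat : Nat) : Int) by omega]
  rw [h]
  unfold pvExpSum
  simp only [Int.toNat_natCast]

-- ===== VERDICT (by name: the statement is the Claim_ definition above) =====
theorem program_specification_value_spec : Claim_equal_program_specification_value := by
  intro iq tq number weight _ hpre
  obtain ⟨h0, hn, hw, hs⟩ := hpre
  unfold Spec_program_specification_value program_specification_value program_specification_value_alt
  dsimp only
  rw [expA_eq, expB_eq iq number weight h0 hn]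
  have hiq : iq = ((iq.toNat : Nat) : Int) := (Int.toNat_of_nonneg h0).symm
  rw [hiq]
  have hfold := enum_fold iq.toNat
      ((pvZfill (pvBin (pvExpSum ((iq.toNat : Nat) : Int) number weight).toNat) (tq - ((iq.toNat : Nat) : Int))).reverse) 0 number
  simp only [Nat.cast_zero] at hfold
  rw [hfold, pvLval_zfill_rev]
  have hs' : 0 ≤ pvExpSum ((iq.toNat : Nat) : Int) number weight := by rw [← hiq]; exact hs
  rw [Int.toNat_of_nonneg hs', Int.toNat_natCast, Nat.add_zero]
  ring
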